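-- pv_equiv track=rewrite | github.com/pypi-data/pypi-mirror-403 | packages/escape-sdk/escape_sdk-2.2.1-py3-none-any.whl/escape/_internal/scraper/scraper.py | _split_sibling_declarations
-- ===== SOURCE A (Python) =====
-- from typing import Any
--
-- def _split_sibling_declarations(
--     class_list: list[tuple[str, Any]], child_to_parent: dict[str, str]
-- ) -> list[list[tuple[str, Any]]]:
--     """Split sibling classes that both declare the same method into separate groups."""
--     if len(class_list) <= 1:
--         return [class_list]
--
--     # Extract simple names
--     simple_names = {path: path.split("/")[-1] for path, _ in class_list}
--
--     # Build relationships: which classes are ancestors of which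
--     def is_ancestor_of(potential_ancestor: str, potential_descendant: str) -> bool:
--         """Check if potential_ancestor is in the ancestor chain of potential_descendant"""
--         current = potential_descendant
--         seen = set()
--         while current in child_to_parent and current not in seen:
--             seen.add(current)
--             parent = child_to_parent[current]
--             if parent == potential_ancestor:
--                 return True
--             current = parent
--         return False
--
--     # Group classes into parent-child chains
--     # Classes that are neither ancestors nor descendants of each other are siblings
--     groups = []
--     assigned = set()
--
--     for i, (path_i, gen_i) in enumerate(class_list):
--         if i in assigned:
--             continue
--
--         simple_i = simple_names[path_i]
--
--         # Start a new group with this class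
--         group = [(path_i, gen_i)]
--         assigned.add(i)
--
--         # Find all descendants of this class
--         for j, (path_j, gen_j) in enumerate(class_list):
--             if j in assigned:
--                 continue
--
--             simple_j = simple_names[path_j]
--
--             # If path_i is ancestor of path_j, add to this group
--             if is_ancestor_of(simple_i, simple_j):
--                 group.append((path_j, gen_j))
--                 assigned.add(j)
--
--         groups.append(group)
--
--     return groups
-- ===== SOURCE B (Python) =====
-- def _split_sibling_declarations(class_list, child_to_parent):
--     """Single ordered pass: walk each class's ancestor chain against a dict of group roots."""
--     if not class_list:
--         return [class_list]
--
--     groups = []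
--     roots = {}  # simple name of a group leader -> index of its group (first leader with that name wins)
--
--     for path, gen in class_list:
--         simple = path.split("/")[-1]
--
--         # Walk the ancestor chain of this class looking for an already-created group root.
--         target = None
--         current = simple
--         seen = set()
--         while current in child_to_parent and current not in seen:
--             seen.add(current)
--             current = child_to_parent[current]
--             if current in roots:
--                 target = roots[current]
--                 break
--
--         if target is None:
--             # No existing group's leader is an ancestor: this class starts a new group.
--             target = len(groups)
--             groups.append([])
--             if simple not in roots:
--                 roots[simple] = target
--
--         groups[target].append((path, gen))
--
--     return groups
-- ===== Notes on version B (the rewrite author's own statement) =====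
-- stated objective: faster
-- what changed: A rescans the whole class list for every group leader and re-walks an ancestor chain per pair (O(n^2) chain walks); B makes one ordered pass, walking each class's ancestor chain once against a dict mapping group-leader simple names to group indices (O(n) chain walks).
import Mathlib
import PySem

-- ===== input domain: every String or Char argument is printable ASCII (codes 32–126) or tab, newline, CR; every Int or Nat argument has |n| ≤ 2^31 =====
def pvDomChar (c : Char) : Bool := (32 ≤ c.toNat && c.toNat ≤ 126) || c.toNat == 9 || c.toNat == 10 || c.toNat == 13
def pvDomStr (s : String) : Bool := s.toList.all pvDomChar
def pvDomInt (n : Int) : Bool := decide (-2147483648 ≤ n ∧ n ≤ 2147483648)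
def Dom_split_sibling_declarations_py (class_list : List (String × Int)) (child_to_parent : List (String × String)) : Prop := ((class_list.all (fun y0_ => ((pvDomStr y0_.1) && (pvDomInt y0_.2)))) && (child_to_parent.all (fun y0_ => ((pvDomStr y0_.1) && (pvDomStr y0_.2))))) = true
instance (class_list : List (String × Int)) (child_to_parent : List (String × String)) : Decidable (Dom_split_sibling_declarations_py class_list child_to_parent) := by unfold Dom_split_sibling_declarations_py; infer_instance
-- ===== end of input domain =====

-- B replaces A's quadratic leader-vs-everyone rescans by one ordered pass that walks each
-- class's ancestor chain against a dict of group roots; equal output on every input.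

-- path.split("/")[-1], used verbatim by both Pythons. "/" is a nonempty separator, so
-- split? is always `some` of a nonempty list and both getD defaults are unreachable.
def pvSimple (p : String) : String :=
  (PySem.List.pyGet? ((PySem.Str.split? p "/").getD []) (-1)).getD ""

-- number of distinct keys of child_to_parent not yet in seen: the while-loops in both
-- Pythons add an unseen key to seen at every iteration, so this measure proves termination
def pvKeysLeft (c2p : List (String × String)) (seen : List String) : Nat :=
  ((PySem.List.dedup (c2p.map Prod.fst)).filter (fun k => !(seen.contains k))).length

theorem pvLookup_isSome_mem {β : Type} (l : List (String × β)) (a : String)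
    (h : (List.lookup a l).isSome = true) : a ∈ l.map Prod.fst := by
  induction l with
  | nil => simp at h
  | cons hd tl ih =>
    obtain ⟨k, v⟩ := hd
    by_cases hx : k = a
    · subst hx; exact List.mem_map.mpr ⟨(k, v), List.mem_cons_self, rfl⟩
    · rw [List.lookup] at h
      have hbeq : (a == k) = false := beq_eq_false_iff_ne.mpr (fun hh => hx hh.symm)
      rw [hbeq] at h
      simpa using Or.inr (ih h)


theorem pvNotMem_of_contains_false {α : Type} [BEq α] [LawfulBEq α] (s : PySem.Set α) (x : α)
    (h : PySem.Set.contains s x = false) : x ∉ s := fun hm => by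
  rw [(PySem.Set.contains_iff s x).mpr hm] at h; cases h

theorem pvKeysLeft_lt (c2p : List (String × String)) (seen seen' : List String) (current : String)
    (hk : (List.lookup current c2p).isSome = true) (hs : current ∉ seen)
    (hmono : ∀ x ∈ seen, x ∈ seen') (hc : current ∈ seen') :
    pvKeysLeft c2p seen' < pvKeysLeft c2p seen := by
  unfold pvKeysLeft
  have hsub : (List.filter (fun k => !(seen'.contains k)) (PySem.List.dedup (c2p.map Prod.fst))).Sublist
      (List.filter (fun k => !(seen.contains k)) (PySem.List.dedup (c2p.map Prod.fst))) := by
    apply List.monotone_filter_right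
    intro a ha
    simp only [Bool.not_eq_true', ← Bool.not_eq_true, List.contains_iff_mem] at *
    intro hmem; exact ha (hmono a hmem)
  rcases Nat.lt_or_ge (List.filter (fun k => !(seen'.contains k)) (PySem.List.dedup (c2p.map Prod.fst))).length
      (List.filter (fun k => !(seen.contains k)) (PySem.List.dedup (c2p.map Prod.fst))).length with h | h
  · exact h
  · exfalso
    have heq := hsub.eq_of_length (Nat.le_antisymm hsub.length_le h)
    have hmem : current ∈ List.filter (fun k => !(seen.contains k)) (PySem.List.dedup (c2p.map Prod.fst)) := by
      rw [List.mem_filter]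
      refine ⟨by rw [PySem.List.mem_dedup]; exact pvLookup_isSome_mem _ _ hk, by simpa using hs⟩
    rw [← heq, List.mem_filter] at hmem
    simp at hmem
    exact hmem.2 hc

-- ===== PORT A =====

-- the `while` loop of is_ancestor_of: step while current is a key and unseen;
-- return True the moment the parent equals potential_ancestor
def pvAncLoop (c2p : List (String × String)) (anc : String) (current : String)
    (seen : PySem.Set String) : Bool :=
  if h : (List.lookup current c2p).isSome = true ∧ (PySem.Set.contains seen current) = false then
    let parent := (List.lookup current c2p).get h.1
    if parent = anc then true
    else pvAncLoop c2p anc parent (PySem.Set.add seen current)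
  else false
termination_by pvKeysLeft c2p seen
decreasing_by
  exact pvKeysLeft_lt c2p seen (PySem.Set.add seen current) current h.1
    (pvNotMem_of_contains_false seen current h.2)
    (fun x hx => (PySem.Set.mem_add seen current x).mpr (Or.inl hx))
    ((PySem.Set.mem_add seen current current).mpr (Or.inr rfl))

-- inner `for j, (path_j, gen_j) in enumerate(class_list)` loop, state (group, assigned)
def pvInnerA (c2p : List (String × String)) (sn : List (String × String)) (si : String) :
    List (Int × (String × Int)) → List (String × Int) → PySem.Set Int →
      (List (String × Int) × PySem.Set Int)
  | [], group, assigned => (group, assigned)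
  | (j, pg) :: rest, group, assigned =>
    if PySem.Set.contains assigned j then pvInnerA c2p sn si rest group assigned
    else
      -- simple_names[path_j]: path_j is always a key, so the getD default is unreachable
      let sj := (List.lookup pg.1 sn).getD ""
      if pvAncLoop c2p si sj PySem.Set.empty then
        pvInnerA c2p sn si rest (group ++ [pg]) (PySem.Set.add assigned j)
      else pvInnerA c2p sn si rest group assigned

-- outer `for i, (path_i, gen_i) in enumerate(class_list)` loop, state (groups, assigned);
-- e is the full enumerated class_list the inner loop rescans each time
def pvOuterA (c2p : List (String × String)) (sn : List (String × String))
    (e : List (Int × (String × Int))) :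
    List (Int × (String × Int)) → List (List (String × Int)) → PySem.Set Int →
      List (List (String × Int))
  | [], groups, _ => groups
  | (i, pg) :: rest, groups, assigned =>
    if PySem.Set.contains assigned i then pvOuterA c2p sn e rest groups assigned
    else
      let si := (List.lookup pg.1 sn).getD ""
      let r := pvInnerA c2p sn si e [pg] (PySem.Set.add assigned i)
      pvOuterA c2p sn e rest (groups ++ [r.1]) r.2

def split_sibling_declarations_py (class_list : List (String × Int)) (child_to_parent : List (String × String)) : List (List (String × Int)) :=
  if class_list.length ≤ 1 then [class_list]
  else
    -- {path: path.split("/")[-1] for path, _ in class_list}: duplicate paths overwrite with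
    -- the identical value, so this first-match association list looks up like the Python dict
    let sn := class_list.map (fun pg => (pg.1, pvSimple pg.1))
    let e := PySem.List.enumerate class_list
    pvOuterA child_to_parent sn e e [] PySem.Set.empty

-- ===== PORT B =====

-- B's `while` loop: walk the ancestor chain until an already-registered group root is met
def pvRootLoop (c2p : List (String × String)) (roots : List (String × Nat)) (current : String)
    (seen : PySem.Set String) : Option Nat :=
  if h : (List.lookup current c2p).isSome = true ∧ (PySem.Set.contains seen current) = false then
    let parent := (List.lookup current c2p).get h.1
    match List.lookup parent roots with
    | some g => some g
    | none => pvRootLoop c2p roots parent (PySem.Set.add seen current)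
  else none
termination_by pvKeysLeft c2p seen
decreasing_by
  exact pvKeysLeft_lt c2p seen (PySem.Set.add seen current) current h.1
    (pvNotMem_of_contains_false seen current h.2)
    (fun x hx => (PySem.Set.mem_add seen current x).mpr (Or.inl hx))
    ((PySem.Set.mem_add seen current current).mpr (Or.inr rfl))

-- groups[t].append(x)
def pvAppendAt : List (List (String × Int)) → Nat → (String × Int) → List (List (String × Int))
  | [], _, _ => []
  | g :: gs, 0, x => (g ++ [x]) :: gs
  | g :: gs, n + 1, x => g :: pvAppendAt gs n x

-- one iteration of B's `for path, gen in class_list` loop over state (groups, roots)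
def pvStepB (c2p : List (String × String))
    (st : List (List (String × Int)) × List (String × Nat)) (pg : String × Int) :
    List (List (String × Int)) × List (String × Nat) :=
  let s := pvSimple pg.1
  match pvRootLoop c2p st.2 s PySem.Set.empty with
  | some t => (pvAppendAt st.1 t pg, st.2)
  | none =>
    -- target = len(groups); groups.append([]); roots.setdefault; groups[target].append(x)
    (st.1 ++ [[pg]],
     if (List.lookup s st.2).isSome then st.2 else st.2 ++ [(s, st.1.length)])

def split_sibling_declarations_py_alt (class_list : List (String × Int)) (child_to_parent : List (String × String)) : List (List (String × Int)) :=
  if class_list = [] then [class_list]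
  else (class_list.foldl (pvStepB child_to_parent) ([], [])).1

-- ===== PRECONDITION & SPEC =====
def Spec_split_sibling_declarations_py (class_list : List (String × Int)) (child_to_parent : List (String × String)) (out : List (List (String × Int))) : Prop := out = split_sibling_declarations_py_alt class_list child_to_parent
instance (class_list : List (String × Int)) (child_to_parent : List (String × String)) (out : List (List (String × Int))) : Decidable (Spec_split_sibling_declarations_py class_list child_to_parent out) := by unfold Spec_split_sibling_declarations_py; infer_instance

-- ===== CLAIM (what is proved, stated in full; the proofs are below) =====
def Claim_equal_split_sibling_declarations_py : Prop := ∀ (class_list : List (String × Int)) (child_to_parent : List (String × String)), Dom_split_sibling_declarations_py class_list child_to_parent → Spec_split_sibling_declarations_py class_list child_to_parent (split_sibling_declarations_py class_list child_to_parent)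

-- ===== LEMMAS AND PROOFS =====

-- the full ancestor chain of `current` (the successive parent values the while-loops visit)
def pvWalk (c2p : List (String × String)) (current : String) (seen : PySem.Set String) :
    List String :=
  if h : (List.lookup current c2p).isSome = true ∧ (PySem.Set.contains seen current) = false then
    let parent := (List.lookup current c2p).get h.1
    parent :: pvWalk c2p parent (PySem.Set.add seen current)
  else []
termination_by pvKeysLeft c2p seen
decreasing_by
  exact pvKeysLeft_lt c2p seen (PySem.Set.add seen current) current h.1
    (pvNotMem_of_contains_false seen current h.2)
    (fun x hx => (PySem.Set.mem_add seen current x).mpr (Or.inl hx))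
    ((PySem.Set.mem_add seen current current).mpr (Or.inr rfl))


theorem pvContains_eq_decide {α : Type} [BEq α] [LawfulBEq α] (s : PySem.Set α) (x : α) :
    PySem.Set.contains s x = decide (x ∈ s) := by
  by_cases h : x ∈ s
  · simp [h]
  · simp only [h, decide_false]
    rcases hb : PySem.Set.contains s x with _ | _
    · rfl
    · exact absurd ((PySem.Set.contains_iff s x).mp hb) h

theorem pvContains_false_of_notMem {α : Type} [BEq α] [LawfulBEq α] (s : PySem.Set α) (x : α)
    (h : x ∉ s) : PySem.Set.contains s x = false := by simp [h]

theorem pvKeysLeft_pos (c2p : List (String × String)) (seen : List String) (current : String)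
    (hk : (List.lookup current c2p).isSome = true) (hs : current ∉ seen) :
    0 < pvKeysLeft c2p seen := by
  unfold pvKeysLeft
  have hmem : current ∈ List.filter (fun k => !(seen.contains k)) (PySem.List.dedup (c2p.map Prod.fst)) := by
    rw [List.mem_filter]
    exact ⟨by rw [PySem.List.mem_dedup]; exact pvLookup_isSome_mem _ _ hk, by simpa using hs⟩
  exact List.length_pos_of_mem hmem

theorem pvWalk_unfold (c2p : List (String × String)) (current : String) (seen : PySem.Set String) :
    pvWalk c2p current seen =
      if h : (List.lookup current c2p).isSome = true ∧ (PySem.Set.contains seen current) = false then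
        ((List.lookup current c2p).get h.1) ::
          pvWalk c2p ((List.lookup current c2p).get h.1) (PySem.Set.add seen current)
      else [] := by
  rw [pvWalk]

theorem pvWalk_prefix_aux (c2p : List (String × String)) :
    ∀ (n : Nat) (current : String) (seen seen' : PySem.Set String),
      pvKeysLeft c2p seen' ≤ n → (∀ x ∈ seen, x ∈ seen') →
      (pvWalk c2p current seen').Sublist (pvWalk c2p current seen) := by
  intro n
  induction n with
  | zero =>
    intro current seen seen' hn hmono
    rw [pvWalk_unfold c2p current seen']
    split
    · rename_i h
      exact absurd (pvKeysLeft_pos c2p seen' current h.1 (pvNotMem_of_contains_false _ _ h.2))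
        (by omega)
    · exact List.nil_sublist _
  | succ n ih =>
    intro current seen seen' hn hmono
    by_cases h' : (List.lookup current c2p).isSome = true ∧ (PySem.Set.contains seen' current) = false
    · have hs' : current ∉ seen' := pvNotMem_of_contains_false _ _ h'.2
      have hs : current ∉ seen := fun hx => hs' (hmono _ hx)
      have h : (List.lookup current c2p).isSome = true ∧ (PySem.Set.contains seen current) = false :=
        ⟨h'.1, pvContains_false_of_notMem _ _ hs⟩
      rw [pvWalk_unfold c2p current seen', dif_pos h', pvWalk_unfold c2p current seen, dif_pos h]
      refine List.Sublist.cons₂ _ (ih _ _ _ ?_ ?_)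
      · have := pvKeysLeft_lt c2p seen' (PySem.Set.add seen' current) current h'.1 hs'
          (fun x hx => (PySem.Set.mem_add seen' current x).mpr (Or.inl hx))
          ((PySem.Set.mem_add seen' current current).mpr (Or.inr rfl))
        omega
      · intro x hx
        rcases (PySem.Set.mem_add seen current x).mp hx with hx | hx
        · exact (PySem.Set.mem_add seen' current x).mpr (Or.inl (hmono _ hx))
        · exact (PySem.Set.mem_add seen' current x).mpr (Or.inr hx)
    · rw [pvWalk_unfold c2p current seen', dif_neg h']
      exact List.nil_sublist _

theorem pvWalk_prefix (c2p : List (String × String)) (current : String)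
    (seen seen' : PySem.Set String) (hmono : ∀ x ∈ seen, x ∈ seen') :
    (pvWalk c2p current seen').Sublist (pvWalk c2p current seen) :=
  pvWalk_prefix_aux c2p (pvKeysLeft c2p seen') current seen seen' (Nat.le_refl _) hmono

-- the "suffix property": everything after an element r of a walk lies in r's own walk
def pvSP (c2p : List (String × String)) (W : List String) : Prop :=
  ∀ l₁ r l₂, W = l₁ ++ r :: l₂ → ∀ x ∈ l₂, x ∈ pvWalk c2p r PySem.Set.empty


theorem pvSP_walk_aux (c2p : List (String × String)) :
    ∀ (n : Nat) (s : String) (seen : PySem.Set String),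
      pvKeysLeft c2p seen ≤ n → pvSP c2p (pvWalk c2p s seen) := by
  intro n
  induction n with
  | zero =>
    intro s seen hn
    rw [pvWalk_unfold c2p s seen]
    split
    · rename_i h
      exact absurd (pvKeysLeft_pos c2p seen s h.1 (pvNotMem_of_contains_false _ _ h.2)) (by omega)
    · intro l₁ r l₂ heq; exact absurd heq (by simp)
  | succ n ih =>
    intro s seen hn
    by_cases h : (List.lookup s c2p).isSome = true ∧ (PySem.Set.contains seen s) = false
    · rw [pvWalk_unfold c2p s seen, dif_pos h]
      have hmeas : pvKeysLeft c2p (PySem.Set.add seen s) ≤ n := by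
        have := pvKeysLeft_lt c2p seen (PySem.Set.add seen s) s h.1
          (pvNotMem_of_contains_false _ _ h.2)
          (fun x hx => (PySem.Set.mem_add seen s x).mpr (Or.inl hx))
          ((PySem.Set.mem_add seen s s).mpr (Or.inr rfl))
        omega
      intro l₁ r l₂ heq x hx
      match l₁, heq with
      | [], heq =>
        have hr : (List.lookup s c2p).get h.1 = r := by simpa using congrArg (fun l => l.headI) heq
        have hl₂ : pvWalk c2p ((List.lookup s c2p).get h.1) (PySem.Set.add seen s) = l₂ := by
          simpa using congrArg (fun l => l.tail) heq
        rw [← hr]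
        exact (pvWalk_prefix c2p ((List.lookup s c2p).get h.1) PySem.Set.empty (PySem.Set.add seen s)
          (by intro y hy; simp [PySem.Set.empty] at hy)).mem (hl₂ ▸ hx)
      | y :: l₁', heq =>
        have htl : pvWalk c2p ((List.lookup s c2p).get h.1) (PySem.Set.add seen s) = l₁' ++ r :: l₂ := by
          simpa using congrArg (fun l => l.tail) heq
        exact ih _ _ hmeas l₁' r l₂ htl x hx
    · rw [pvWalk_unfold c2p s seen, dif_neg h]
      intro l₁ r l₂ heq; exact absurd heq (by simp)

theorem pvSP_walk (c2p : List (String × String)) (s : String) (seen : PySem.Set String) :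
    pvSP c2p (pvWalk c2p s seen) :=
  pvSP_walk_aux c2p (pvKeysLeft c2p seen) s seen (Nat.le_refl _)


theorem pvAncLoop_unfold (c2p : List (String × String)) (a current : String)
    (seen : PySem.Set String) :
    pvAncLoop c2p a current seen =
      if h : (List.lookup current c2p).isSome = true ∧ (PySem.Set.contains seen current) = false then
        if (List.lookup current c2p).get h.1 = a then true
        else pvAncLoop c2p a ((List.lookup current c2p).get h.1) (PySem.Set.add seen current)
      else false := by
  rw [pvAncLoop]

theorem pvAncLoop_iff_aux (c2p : List (String × String)) (a : String) :
    ∀ (n : Nat) (current : String) (seen : PySem.Set String), pvKeysLeft c2p seen ≤ n →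
      (pvAncLoop c2p a current seen = true ↔ a ∈ pvWalk c2p current seen) := by
  intro n
  induction n with
  | zero =>
    intro current seen hn
    rw [pvAncLoop_unfold, pvWalk_unfold]
    split
    · rename_i h
      exact absurd (pvKeysLeft_pos c2p seen current h.1 (pvNotMem_of_contains_false _ _ h.2)) (by omega)
    · simp
  | succ n ih =>
    intro current seen hn
    rw [pvAncLoop_unfold, pvWalk_unfold]
    by_cases h : (List.lookup current c2p).isSome = true ∧ (PySem.Set.contains seen current) = false
    · rw [dif_pos h, dif_pos h]
      have hmeas : pvKeysLeft c2p (PySem.Set.add seen current) ≤ n := by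
        have := pvKeysLeft_lt c2p seen (PySem.Set.add seen current) current h.1
          (pvNotMem_of_contains_false _ _ h.2)
          (fun x hx => (PySem.Set.mem_add seen current x).mpr (Or.inl hx))
          ((PySem.Set.mem_add seen current current).mpr (Or.inr rfl))
        omega
      by_cases hp : (List.lookup current c2p).get h.1 = a
      · simp [hp]
      · simp only [if_neg hp, List.mem_cons]
        rw [ih _ _ hmeas]
        constructor
        · exact Or.inr
        · rintro (hh | hh)
          · exact absurd hh.symm hp
          · exact hh
    · rw [dif_neg h, dif_neg h]; simp

theorem pvAncLoop_iff (c2p : List (String × String)) (a current : String)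
    (seen : PySem.Set String) :
    pvAncLoop c2p a current seen = true ↔ a ∈ pvWalk c2p current seen :=
  pvAncLoop_iff_aux c2p a (pvKeysLeft c2p seen) current seen (Nat.le_refl _)

def pvFirstHit (roots : List (String × Nat)) : List String → Option Nat
  | [] => none
  | p :: W => match List.lookup p roots with
    | some g => some g
    | none => pvFirstHit roots W


theorem pvRootLoop_unfold (c2p : List (String × String)) (roots : List (String × Nat))
    (current : String) (seen : PySem.Set String) :
    pvRootLoop c2p roots current seen =
      if h : (List.lookup current c2p).isSome = true ∧ (PySem.Set.contains seen current) = false then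
        match List.lookup ((List.lookup current c2p).get h.1) roots with
        | some g => some g
        | none => pvRootLoop c2p roots ((List.lookup current c2p).get h.1) (PySem.Set.add seen current)
      else none := by
  rw [pvRootLoop]

theorem pvRootLoop_eq_aux (c2p : List (String × String)) (roots : List (String × Nat)) :
    ∀ (n : Nat) (current : String) (seen : PySem.Set String), pvKeysLeft c2p seen ≤ n →
      pvRootLoop c2p roots current seen = pvFirstHit roots (pvWalk c2p current seen) := by
  intro n
  induction n with
  | zero =>
    intro current seen hn
    rw [pvRootLoop_unfold, pvWalk_unfold]
    split
    · rename_i h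
      exact absurd (pvKeysLeft_pos c2p seen current h.1 (pvNotMem_of_contains_false _ _ h.2)) (by omega)
    · simp [pvFirstHit]
  | succ n ih =>
    intro current seen hn
    rw [pvRootLoop_unfold, pvWalk_unfold]
    by_cases h : (List.lookup current c2p).isSome = true ∧ (PySem.Set.contains seen current) = false
    · rw [dif_pos h, dif_pos h]
      have hmeas : pvKeysLeft c2p (PySem.Set.add seen current) ≤ n := by
        have := pvKeysLeft_lt c2p seen (PySem.Set.add seen current) current h.1
          (pvNotMem_of_contains_false _ _ h.2)
          (fun x hx => (PySem.Set.mem_add seen current x).mpr (Or.inl hx))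
          ((PySem.Set.mem_add seen current current).mpr (Or.inr rfl))
        omega
      rw [pvFirstHit]
      rcases List.lookup ((List.lookup current c2p).get h.1) roots with _ | g
      · exact ih _ _ hmeas
      · rfl
    · rw [dif_neg h, dif_neg h]; rfl

theorem pvRootLoop_eq (c2p : List (String × String)) (roots : List (String × Nat))
    (current : String) (seen : PySem.Set String) :
    pvRootLoop c2p roots current seen = pvFirstHit roots (pvWalk c2p current seen) :=
  pvRootLoop_eq_aux c2p roots (pvKeysLeft c2p seen) current seen (Nat.le_refl _)

-- ---- common reference process: incremental grouping with explicit leader names ----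

def pvAncF (c2p : List (String × String)) (a : String) (q : String × Int) : Bool :=
  decide (a ∈ pvWalk c2p (pvSimple q.1) PySem.Set.empty)

def pvM (c2p : List (String × String)) : List (String × Int) → List (String × List (String × Int))
  | [] => []
  | x :: l =>
    (pvSimple x.1, x :: l.filter (pvAncF c2p (pvSimple x.1))) ::
      pvM c2p (l.filter (fun q => !pvAncF c2p (pvSimple x.1) q))
termination_by l => l.length
decreasing_by simp; exact le_trans (List.length_filter_le _ _) (by simp)

def pvMstep (c2p : List (String × String)) :
    List (String × List (String × Int)) → (String × Int) → List (String × List (String × Int))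
  | [], x => [(pvSimple x.1, [x])]
  | (s, m) :: gs, x =>
    if pvAncF c2p s x then (s, m ++ [x]) :: gs else (s, m) :: pvMstep c2p gs x

def pvDistribute (c2p : List (String × String)) :
    List (String × List (String × Int)) → List (String × Int) → List (String × List (String × Int))
  | [], cl => pvM c2p cl
  | (s, m) :: gs, cl =>
    (s, m ++ cl.filter (pvAncF c2p s)) :: pvDistribute c2p gs (cl.filter (fun q => !pvAncF c2p s q))

theorem pvM_nil (c2p : List (String × String)) : pvM c2p [] = [] := by
  rw [pvM]

theorem pvM_unfold (c2p : List (String × String)) (x : String × Int) (l : List (String × Int)) :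
    pvM c2p (x :: l) =
      (pvSimple x.1, x :: l.filter (pvAncF c2p (pvSimple x.1))) ::
        pvM c2p (l.filter (fun q => !pvAncF c2p (pvSimple x.1) q)) := by
  rw [pvM]

theorem pvDistribute_nil (c2p : List (String × String)) :
    ∀ gs, pvDistribute c2p gs [] = gs := by
  intro gs
  induction gs with
  | nil => simp [pvDistribute, pvM]
  | cons hd gs ih => obtain ⟨a, m⟩ := hd; simp [pvDistribute, ih]

theorem pvMstep_distribute (c2p : List (String × String)) (x : String × Int) :
    ∀ gs l, pvDistribute c2p (pvMstep c2p gs x) l = pvDistribute c2p gs (x :: l) := by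
  intro gs
  induction gs with
  | nil =>
    intro l
    simp [pvMstep, pvDistribute, pvM_unfold]
  | cons hd gs ih =>
    obtain ⟨a, m⟩ := hd
    intro l
    by_cases h : pvAncF c2p a x
    · simp [pvMstep, pvDistribute, h]
    · simp [pvMstep, pvDistribute, h, ih]

theorem pvFoldM_eq_M (c2p : List (String × String)) :
    ∀ (cl : List (String × Int)) gs, cl.foldl (pvMstep c2p) gs = pvDistribute c2p gs cl := by
  intro cl
  induction cl with
  | nil => intro gs; simp [pvDistribute_nil]
  | cons x cl ih => intro gs; rw [List.foldl_cons, ih, pvMstep_distribute]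

-- ---- A's loops compute pvM ----

theorem pvContains_add_of_ne {α : Type} [BEq α] [LawfulBEq α] (s : PySem.Set α) (x y : α)
    (h : y ≠ x) : PySem.Set.contains (PySem.Set.add s x) y = PySem.Set.contains s y := by
  have hiff : (y ∈ PySem.Set.add s x) ↔ y ∈ s := by
    rw [PySem.Set.mem_add]; exact or_iff_left h
  rw [pvContains_eq_decide, pvContains_eq_decide]
  simp [hiff]

theorem pvAncLoop_eq_ancF (c2p : List (String × String)) (si : String) (pg : String × Int) :
    pvAncLoop c2p si (pvSimple pg.1) ([] : PySem.Set String) = pvAncF c2p si pg := by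
  by_cases hw : si ∈ pvWalk c2p (pvSimple pg.1) ([] : PySem.Set String)
  · rw [(pvAncLoop_iff _ _ _ _).mpr hw]; simpa [pvAncF, PySem.Set.empty] using hw
  · have hfalse : pvAncLoop c2p si (pvSimple pg.1) ([] : PySem.Set String) = false :=
      Bool.not_eq_true _ ▸ (fun h => hw ((pvAncLoop_iff _ _ _ _).mp h))
    rw [hfalse]; simpa [pvAncF, PySem.Set.empty] using hw

theorem pvInnerA_spec (c2p : List (String × String)) (sn : List (String × String)) (si : String) :
    ∀ (e : List (Int × (String × Int))) (group : List (String × Int)) (assigned : PySem.Set Int),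
      (e.map Prod.fst).Nodup →
      (∀ q ∈ e, List.lookup q.2.1 sn = some (pvSimple q.2.1)) →
      (pvInnerA c2p sn si e group assigned).1 =
        group ++ (e.filter (fun q => !(PySem.Set.contains assigned q.1) && pvAncF c2p si q.2)).map Prod.snd ∧
      ∀ k, k ∈ (pvInnerA c2p sn si e group assigned).2 ↔
        k ∈ assigned ∨ k ∈ (e.filter (fun q => !(PySem.Set.contains assigned q.1) && pvAncF c2p si q.2)).map Prod.fst := by
  intro e
  induction e with
  | nil => intro group assigned _ _; simp [pvInnerA]
  | cons q rest ih =>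
    obtain ⟨j, pg⟩ := q
    intro group assigned hnd hsn
    have hnd0 := List.nodup_cons.mp (show (j :: rest.map Prod.fst).Nodup by simpa using hnd)
    have hnd' : (rest.map Prod.fst).Nodup := hnd0.2
    have hj : j ∉ rest.map Prod.fst := hnd0.1
    have hsn' : ∀ q ∈ rest, List.lookup q.2.1 sn = some (pvSimple q.2.1) :=
      fun q hq => hsn q (List.mem_cons_of_mem _ hq)
    have hsj : (List.lookup pg.1 sn).getD "" = pvSimple pg.1 := by
      rw [hsn (j, pg) List.mem_cons_self]; rfl
    by_cases hc : PySem.Set.contains assigned j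
    · have hcm : j ∈ assigned := (PySem.Set.contains_iff _ _).mp hc
      have hstep : pvInnerA c2p sn si ((j, pg) :: rest) group assigned =
          pvInnerA c2p sn si rest group assigned := by
        simp [pvInnerA, hcm]
      have hfilter : List.filter (fun q => !(PySem.Set.contains assigned q.1) && pvAncF c2p si q.2) ((j, pg) :: rest) =
          List.filter (fun q => !(PySem.Set.contains assigned q.1) && pvAncF c2p si q.2) rest := by
        rw [List.filter_cons]; simp [hcm]
      rw [hstep, hfilter]
      exact ih group assigned hnd' hsn'
    · rw [Bool.not_eq_true] at hc
      have hcm : j ∉ assigned := pvNotMem_of_contains_false assigned j hc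
      have hfc : ∀ (A : PySem.Set Int),
          List.filter (fun q => !(PySem.Set.contains (PySem.Set.add A j) q.1) && pvAncF c2p si q.2) rest =
          List.filter (fun q => !(PySem.Set.contains A q.1) && pvAncF c2p si q.2) rest := by
        intro A
        apply List.filter_congr
        intro q hq
        have hne : q.1 ≠ j := fun hh => hj (hh ▸ List.mem_map.mpr ⟨q, hq, rfl⟩)
        rw [pvContains_add_of_ne A j q.1 hne]
      by_cases hanc : pvAncF c2p si pg
      · have hstep : pvInnerA c2p sn si ((j, pg) :: rest) group assigned =
            pvInnerA c2p sn si rest (group ++ [pg]) (PySem.Set.add assigned j) := by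
          simp [pvInnerA, hcm, hsj, pvAncLoop_eq_ancF, hanc]
        have hfilter : List.filter (fun q => !(PySem.Set.contains assigned q.1) && pvAncF c2p si q.2) ((j, pg) :: rest) =
            (j, pg) :: List.filter (fun q => !(PySem.Set.contains assigned q.1) && pvAncF c2p si q.2) rest := by
          rw [List.filter_cons]; simp [hcm, hanc]
        rw [hstep, hfilter]
        obtain ⟨ih1, ih2⟩ := ih (group ++ [pg]) (PySem.Set.add assigned j) hnd' hsn'
        constructor
        · rw [ih1, hfc]; simp
        · intro k
          rw [ih2 k, hfc, PySem.Set.mem_add]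
          simp only [List.map_cons, List.mem_cons]
          tauto
      · rw [Bool.not_eq_true] at hanc
        have hstep : pvInnerA c2p sn si ((j, pg) :: rest) group assigned =
            pvInnerA c2p sn si rest group assigned := by
          simp [pvInnerA, hcm, hsj, pvAncLoop_eq_ancF, hanc]
        have hfilter : List.filter (fun q => !(PySem.Set.contains assigned q.1) && pvAncF c2p si q.2) ((j, pg) :: rest) =
            List.filter (fun q => !(PySem.Set.contains assigned q.1) && pvAncF c2p si q.2) rest := by
          rw [List.filter_cons]; simp [hanc]
        rw [hstep, hfilter]
        exact ih group assigned hnd' hsn'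

theorem pvMapSnd_filter (P : (String × Int) → Bool) (l : List (Int × (String × Int))) :
    (l.filter (fun q => P q.2)).map Prod.snd = (l.map Prod.snd).filter P := by
  induction l with
  | nil => rfl
  | cons q l ih =>
    by_cases h : P q.2 <;> simp [h, ih]

theorem pvMemFstFilter {l : List (Int × (String × Int))} (hnd : (l.map Prod.fst).Nodup)
    (P : (Int × (String × Int)) → Bool) (q : Int × (String × Int)) (hq : q ∈ l) :
    q.1 ∈ (l.filter P).map Prod.fst ↔ P q = true := by
  constructor
  · intro h
    obtain ⟨q', hq', hfst⟩ := List.mem_map.mp h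
    obtain ⟨hq'l, hP⟩ := List.mem_filter.mp hq'
    have : q' = q := List.inj_on_of_nodup_map hnd hq'l hq hfst
    exact this ▸ hP
  · intro h
    exact List.mem_map.mpr ⟨q, List.mem_filter.mpr ⟨hq, h⟩, rfl⟩

theorem pvOuterA_spec (c2p : List (String × String)) (sn : List (String × String))
    (e : List (Int × (String × Int)))
    (hnd : (e.map Prod.fst).Nodup)
    (hsn : ∀ q ∈ e, List.lookup q.2.1 sn = some (pvSimple q.2.1)) :
    ∀ (s : List (Int × (String × Int))) (groups : List (List (String × Int)))
      (assigned : PySem.Set Int),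
      s.Sublist e →
      e.filter (fun q => !(PySem.Set.contains assigned q.1)) =
        s.filter (fun q => !(PySem.Set.contains assigned q.1)) →
      pvOuterA c2p sn e s groups assigned =
        groups ++ (pvM c2p ((s.filter (fun q => !(PySem.Set.contains assigned q.1))).map Prod.snd)).map Prod.snd := by
  intro s
  induction s with
  | nil =>
    intro groups assigned _ _
    simp [pvOuterA, pvM]
  | cons q rest ih =>
    obtain ⟨i, pg⟩ := q
    intro groups assigned hsub hfeq
    have hsub' : rest.Sublist e := (List.sublist_cons_self (i, pg) rest).trans hsub
    have hnds : (((i, pg) :: rest).map Prod.fst).Nodup := (hsub.map Prod.fst).nodup hnd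
    have hi_rest : i ∉ rest.map Prod.fst :=
      (List.nodup_cons.mp (show (i :: rest.map Prod.fst).Nodup by simpa using hnds)).1
    by_cases hc : i ∈ assigned
    · have hcb : PySem.Set.contains assigned i = true := (PySem.Set.contains_iff _ _).mpr hc
      have hstep : pvOuterA c2p sn e ((i, pg) :: rest) groups assigned =
          pvOuterA c2p sn e rest groups assigned := by
        simp [pvOuterA, hc]
      have hfhead : ((i, pg) :: rest).filter (fun q => !(PySem.Set.contains assigned q.1)) =
          rest.filter (fun q => !(PySem.Set.contains assigned q.1)) := by
        rw [List.filter_cons]; simp [hc]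
      rw [hfhead] at hfeq
      rw [hstep, hfhead]
      exact ih groups assigned hsub' hfeq
    · have hcb : PySem.Set.contains assigned i = false := pvContains_false_of_notMem _ _ hc
      have hin : (i, pg) ∈ e := hsub.mem List.mem_cons_self
      have hsi : (List.lookup pg.1 sn).getD "" = pvSimple pg.1 := by
        rw [hsn (i, pg) hin]; rfl
      -- abbreviations
      set si := pvSimple pg.1 with hsi_def
      -- captured elements of the inner scan, as a filter of rest
      have hEfilter :
          e.filter (fun q => !(PySem.Set.contains (PySem.Set.add assigned i) q.1) && pvAncF c2p si q.2) =
          rest.filter (fun q => !(PySem.Set.contains assigned q.1) && pvAncF c2p si q.2) := by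
        have h1 : ∀ q : Int × (String × Int),
            (!(PySem.Set.contains (PySem.Set.add assigned i) q.1) && pvAncF c2p si q.2) =
            ((!(q.1 == i) && pvAncF c2p si q.2) && !(PySem.Set.contains assigned q.1)) := by
          intro q
          rw [pvContains_eq_decide, pvContains_eq_decide]
          by_cases hqi : q.1 = i
          · simp [hqi, PySem.Set.mem_add]
          · have hmm : (q.1 ∈ PySem.Set.add assigned i) ↔ q.1 ∈ assigned := by
              rw [PySem.Set.mem_add]; exact or_iff_left hqi
            have hb : (q.1 == i) = false := beq_eq_false_iff_ne.mpr hqi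
            simp [hmm, hb, Bool.and_comm]
        rw [List.filter_congr (fun x _ => h1 x), ← List.filter_filter, hfeq,
          List.filter_cons]
        simp only [hcb, Bool.not_false, if_pos]
        rw [List.filter_cons]
        simp only [beq_self_eq_true, Bool.not_true, Bool.false_and, Bool.false_eq_true, if_false]
        rw [List.filter_filter]
        apply List.filter_congr
        intro q hq
        have hqi : q.1 ≠ i := fun hh => hi_rest (hh ▸ List.mem_map.mpr ⟨q, hq, rfl⟩)
        have hb : (q.1 == i) = false := beq_eq_false_iff_ne.mpr hqi
        simp [hb, Bool.and_comm]
      obtain ⟨h1, h2⟩ := pvInnerA_spec c2p sn si e [pg] (PySem.Set.add assigned i) hnd hsn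
      rw [hEfilter] at h1 h2
      -- the step the outer loop takes
      have hstep : pvOuterA c2p sn e ((i, pg) :: rest) groups assigned =
          pvOuterA c2p sn e rest
            (groups ++ [(pvInnerA c2p sn si e [pg] (PySem.Set.add assigned i)).1])
            (pvInnerA c2p sn si e [pg] (PySem.Set.add assigned i)).2 := by
        simp [pvOuterA, hc, hsi]
      -- filter equality for the recursive call
      set A' := (pvInnerA c2p sn si e [pg] (PySem.Set.add assigned i)).2 with hA'
      set cap := rest.filter (fun q => !(PySem.Set.contains assigned q.1) && pvAncF c2p si q.2) with hcap
      have hmemA' : ∀ k, k ∈ A' ↔ (k ∈ assigned ∨ k = i) ∨ k ∈ cap.map Prod.fst := by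
        intro k
        rw [h2 k, PySem.Set.mem_add]
      have hnp' : ∀ q : Int × (String × Int),
          (!(PySem.Set.contains A' q.1)) =
          ((!(q.1 == i) && !(decide (q.1 ∈ cap.map Prod.fst))) && !(PySem.Set.contains assigned q.1)) := by
        intro q
        rw [pvContains_eq_decide, pvContains_eq_decide]
        have hd : decide (q.1 ∈ A') =
            ((decide (q.1 ∈ assigned) || (q.1 == i)) || decide (q.1 ∈ cap.map Prod.fst)) := by
          rw [decide_eq_decide.mpr (hmemA' q.1)]
          · by_cases hqi' : q.1 = i
            · simp [hqi']
            · simp [hqi', beq_eq_false_iff_ne.mpr hqi']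
          · infer_instance
        rw [hd]
        rcases Bool.eq_false_or_eq_true (decide (q.1 ∈ assigned)) with ha | ha <;>
          rcases Bool.eq_false_or_eq_true (q.1 == i) with hbq | hbq <;>
          rcases Bool.eq_false_or_eq_true (decide (q.1 ∈ cap.map Prod.fst)) with hcq | hcq <;>
          rw [ha, hbq, hcq] <;> rfl
      have hfeq' :
          e.filter (fun q => !(PySem.Set.contains A' q.1)) =
          rest.filter (fun q => !(PySem.Set.contains A' q.1)) := by
        rw [List.filter_congr (fun x _ => hnp' x), ← List.filter_filter, hfeq, List.filter_cons]
        simp only [hcb, Bool.not_false, if_pos]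
        rw [List.filter_cons]
        simp only [beq_self_eq_true, Bool.not_true, Bool.false_and, Bool.false_eq_true, if_false]
        rw [List.filter_filter, List.filter_congr (fun x _ => (hnp' x).symm)]
      rw [hstep, ih _ A' hsub' hfeq']
      -- now compute the right-hand side
      have hnprest : ∀ q ∈ rest, (!(PySem.Set.contains A' q.1)) =
          (!(PySem.Set.contains assigned q.1) && !(pvAncF c2p si q.2)) := by
        intro q hq
        have hqi : q.1 ≠ i := fun hh => hi_rest (hh ▸ List.mem_map.mpr ⟨q, hq, rfl⟩)
        have hndrest : (rest.map Prod.fst).Nodup :=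
          (List.nodup_cons.mp (show (i :: rest.map Prod.fst).Nodup by simpa using hnds)).2
        have hcapmem : q.1 ∈ cap.map Prod.fst ↔
            (!(PySem.Set.contains assigned q.1) && pvAncF c2p si q.2) = true := by
          rw [hcap]; exact pvMemFstFilter hndrest _ q hq
        have hdcap : decide (q.1 ∈ cap.map Prod.fst) =
            (!(PySem.Set.contains assigned q.1) && pvAncF c2p si q.2) := by
          by_cases hm : q.1 ∈ cap.map Prod.fst
          · rw [decide_eq_true hm, (hcapmem.mp hm)]
          · rw [decide_eq_false hm]
            rcases Bool.eq_false_or_eq_true (!(PySem.Set.contains assigned q.1) && pvAncF c2p si q.2) with hh | hh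
            · exact absurd (hcapmem.mpr hh) hm
            · rw [hh]
        have hb : (q.1 == i) = false := beq_eq_false_iff_ne.mpr hqi
        rw [hnp' q, hb, hdcap]
        rcases Bool.eq_false_or_eq_true (PySem.Set.contains assigned q.1) with ha | ha <;>
          rcases Bool.eq_false_or_eq_true (pvAncF c2p si q.2) with hx | hx <;>
          rw [ha, hx] <;> rfl
      -- final assembly
      rw [List.filter_cons]
      simp only [hcb, Bool.not_false, if_pos]
      rw [List.map_cons, pvM_unfold]
      have hgrp : (pvInnerA c2p sn si e [pg] (PySem.Set.add assigned i)).1 =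
          pg :: ((rest.filter (fun q => !(PySem.Set.contains assigned q.1))).map Prod.snd).filter (pvAncF c2p si) := by
        rw [h1]
        have : cap = (rest.filter (fun q => !(PySem.Set.contains assigned q.1))).filter
            (fun q => pvAncF c2p si q.2) := by
          rw [hcap, List.filter_filter]
          exact List.filter_congr (fun x _ => Bool.and_comm _ _)
        rw [hcap] at this ⊢
        rw [this, pvMapSnd_filter]
        rfl
      have htail : (rest.filter (fun q => !(PySem.Set.contains A' q.1))).map Prod.snd =
          ((rest.filter (fun q => !(PySem.Set.contains assigned q.1))).map Prod.snd).filter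
            (fun q => !pvAncF c2p si q) := by
        rw [List.filter_congr hnprest, ← List.filter_filter, ← pvMapSnd_filter]
        congr 1
        rw [List.filter_filter, List.filter_filter]
        exact List.filter_congr (fun x _ => Bool.and_comm _ _)
      rw [hgrp, htail]
      simp [List.append_assoc, hsi_def]

-- ---- B's single pass computes pvMstep folding ----

def pvIdxOf (x : String) : List String → Option Nat
  | [] => none
  | s :: names => if s = x then some 0 else (pvIdxOf x names).map (· + 1)

def pvMFind (W : List String) : List String → Option Nat
  | [] => none
  | s :: names => if s ∈ W then some 0 else (pvMFind W names).map (· + 1)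

def pvInv (c2p : List (String × String)) (gs : List (String × List (String × Int)))
    (roots : List (String × Nat)) : Prop :=
  (∀ name, List.lookup name roots = pvIdxOf name (gs.map Prod.fst)) ∧
  List.Pairwise (fun a b => a ∉ pvWalk c2p b PySem.Set.empty) (gs.map Prod.fst)

theorem pvIdxOf_none_iff (x : String) : ∀ names, pvIdxOf x names = none ↔ x ∉ names := by
  intro names
  induction names with
  | nil => simp [pvIdxOf]
  | cons s names ih =>
    rw [pvIdxOf]
    by_cases h : s = x
    · simp [h]
    · rw [if_neg h, Option.map_eq_none_iff, ih]
      constructor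
      · intro hn hmem
        rcases List.mem_cons.mp hmem with hh | hh
        · exact h hh.symm
        · exact hn hh
      · intro hn hmem
        exact hn (List.mem_cons_of_mem _ hmem)

theorem pvIdxOf_some_split (x : String) :
    ∀ names k, pvIdxOf x names = some k →
      ∃ n₁ n₂, names = n₁ ++ x :: n₂ ∧ x ∉ n₁ ∧ k = n₁.length := by
  intro names
  induction names with
  | nil => intro k h; simp [pvIdxOf] at h
  | cons s names ih =>
    intro k h
    by_cases hs : s = x
    · exact ⟨[], names, by simp [hs], by simp, by rw [pvIdxOf, if_pos hs] at h; cases h; rfl⟩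
    · rw [pvIdxOf, if_neg hs] at h
      obtain ⟨k', hk', hkk⟩ := Option.map_eq_some_iff.mp h
      obtain ⟨n₁, n₂, hsplit, hnot, hlen⟩ := ih k' hk'
      exact ⟨s :: n₁, n₂, by rw [hsplit]; rfl,
        by simp [hnot]; exact fun hh => hs hh.symm, by simp [hlen, ← hkk]⟩

theorem pvIdxOf_append (x s : String) : ∀ names,
    pvIdxOf x (names ++ [s]) =
      (match pvIdxOf x names with
       | some k => some k
       | none => if s = x then some names.length else none) := by
  intro names
  induction names with
  | nil => simp [pvIdxOf]
  | cons t names ih =>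
    by_cases ht : t = x
    · simp [pvIdxOf, ht]
    · rw [List.cons_append, pvIdxOf, if_neg ht, pvIdxOf, if_neg ht, ih]
      rcases hi : pvIdxOf x names with _ | k
      · by_cases hs : s = x <;> simp [hs]
      · simp

theorem pvMFind_none_iff (W : List String) : ∀ names,
    pvMFind W names = none ↔ ∀ s ∈ names, s ∉ W := by
  intro names
  induction names with
  | nil => simp [pvMFind]
  | cons s names ih =>
    by_cases h : s ∈ W
    · simp [pvMFind, h]
    · simp [pvMFind, h, ih]

theorem pvMFind_append_eq (W : List String) (n₁ : List String) (p : String) (n₂ : List String)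
    (h1 : ∀ q ∈ n₁, q ∉ W) (h2 : p ∈ W) :
    pvMFind W (n₁ ++ p :: n₂) = some n₁.length := by
  induction n₁ with
  | nil => simp [pvMFind, h2]
  | cons q n₁ ih =>
    rw [List.cons_append, pvMFind, if_neg (by simpa using h1 q List.mem_cons_self),
      ih (fun r hr => h1 r (List.mem_cons_of_mem _ hr))]
    rfl

theorem pvMFind_congr (W W' : List String) : ∀ names,
    (∀ s ∈ names, (s ∈ W ↔ s ∈ W')) → pvMFind W names = pvMFind W' names := by
  intro names
  induction names with
  | nil => intro _; rfl
  | cons s names ih =>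
    intro h
    rw [pvMFind, pvMFind, ih (fun r hr => h r (List.mem_cons_of_mem _ hr))]
    by_cases hs : s ∈ W
    · rw [if_pos hs, if_pos ((h s List.mem_cons_self).mp hs)]
    · rw [if_neg hs, if_neg (fun hh => hs ((h s List.mem_cons_self).mpr hh))]

-- the crux: B's first root hit along the ancestor chain is exactly the first group
-- (in creation order) whose leader is an ancestor, because no leader's name is an
-- ancestor of a later leader's name
theorem pvFirstHit_eq_mFind (c2p : List (String × String)) (roots : List (String × Nat))
    (names : List String)
    (hroots : ∀ name, List.lookup name roots = pvIdxOf name names)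
    (hpw : List.Pairwise (fun a b => a ∉ pvWalk c2p b PySem.Set.empty) names) :
    ∀ W, pvSP c2p W → pvFirstHit roots W = pvMFind W names := by
  intro W
  induction W with
  | nil =>
    intro _
    rw [show pvFirstHit roots [] = none from rfl]
    symm
    rw [pvMFind_none_iff]
    simp
  | cons p W' ihW =>
    intro hsp
    have hsp' : pvSP c2p W' := fun l₁ r l₂ heq => hsp (p :: l₁) r l₂ (by rw [heq]; rfl)
    have hfh : pvFirstHit roots (p :: W') =
        (match List.lookup p roots with
         | some g => some g
         | none => pvFirstHit roots W') := rfl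
    rw [hfh, hroots p]
    rcases hidx : pvIdxOf p names with _ | k
    · have hp : p ∉ names := (pvIdxOf_none_iff _ _).mp hidx
      rw [ihW hsp']
      apply pvMFind_congr
      intro r hr
      have : r ≠ p := fun hh => hp (hh ▸ hr)
      simp [this]
    · obtain ⟨n₁, n₂, hsplit, hnot, hk⟩ := pvIdxOf_some_split p names k hidx
      have hq : ∀ q ∈ n₁, q ∉ (p :: W') := by
        intro q hq1 hqW
        rcases List.mem_cons.mp hqW with h | h
        · exact hnot (h ▸ hq1)
        · have hqw : q ∈ pvWalk c2p p PySem.Set.empty := hsp [] p W' rfl q h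
          have hpair : List.Pairwise (fun a b => a ∉ pvWalk c2p b PySem.Set.empty)
              (n₁ ++ p :: n₂) := hsplit ▸ hpw
          exact (List.pairwise_append.mp hpair).2.2 q hq1 p List.mem_cons_self hqw
      rw [hsplit, pvMFind_append_eq (p :: W') n₁ p n₂ hq List.mem_cons_self, hk]

theorem pvMstep_of_none (c2p : List (String × String)) (x : String × Int) :
    ∀ gs, pvMFind (pvWalk c2p (pvSimple x.1) PySem.Set.empty) (gs.map Prod.fst) = none →
      pvMstep c2p gs x = gs ++ [(pvSimple x.1, [x])] := by
  intro gs
  induction gs with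
  | nil => intro _; rfl
  | cons hd gs ih =>
    obtain ⟨s, m⟩ := hd
    intro h
    rw [List.map_cons, pvMFind] at h
    by_cases hs : s ∈ pvWalk c2p (pvSimple x.1) PySem.Set.empty
    · rw [if_pos hs] at h; cases h
    · rw [if_neg hs, Option.map_eq_none_iff] at h
      have hanc : pvAncF c2p s x = false := by unfold pvAncF; exact decide_eq_false hs
      rw [pvMstep, if_neg (by simp [hanc]), ih h]
      rfl

theorem pvMstep_of_some (c2p : List (String × String)) (x : String × Int) :
    ∀ gs k, pvMFind (pvWalk c2p (pvSimple x.1) PySem.Set.empty) (gs.map Prod.fst) = some k →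
      (pvMstep c2p gs x).map Prod.fst = gs.map Prod.fst ∧
      (pvMstep c2p gs x).map Prod.snd = pvAppendAt (gs.map Prod.snd) k x := by
  intro gs
  induction gs with
  | nil => intro k h; cases h
  | cons hd gs ih =>
    obtain ⟨s, m⟩ := hd
    intro k h
    rw [List.map_cons, pvMFind] at h
    by_cases hs : s ∈ pvWalk c2p (pvSimple x.1) PySem.Set.empty
    · rw [if_pos hs] at h
      have hk : k = 0 := by cases h; rfl
      have hanc : pvAncF c2p s x = true := by unfold pvAncF; exact decide_eq_true hs
      rw [pvMstep, if_pos (by simp [hanc]), hk]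
      exact ⟨rfl, rfl⟩
    · rw [if_neg hs, Option.map_eq_some_iff] at h
      obtain ⟨k', hk', hkk⟩ := h
      have hanc : pvAncF c2p s x = false := by unfold pvAncF; exact decide_eq_false hs
      obtain ⟨ih1, ih2⟩ := ih k' hk'
      rw [pvMstep, if_neg (by simp [hanc])]
      refine ⟨by simpa using ih1, ?_⟩
      rw [← hkk]
      simpa [pvAppendAt] using ih2

theorem pvStepB_sim (c2p : List (String × String)) (gs : List (String × List (String × Int)))
    (roots : List (String × Nat)) (x : String × Int) (hinv : pvInv c2p gs roots) :
    (pvStepB c2p (gs.map Prod.snd, roots) x).1 = (pvMstep c2p gs x).map Prod.snd ∧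
    pvInv c2p (pvMstep c2p gs x) (pvStepB c2p (gs.map Prod.snd, roots) x).2 := by
  obtain ⟨hroots, hpw⟩ := hinv
  have hfh : pvRootLoop c2p roots (pvSimple x.1) PySem.Set.empty =
      pvMFind (pvWalk c2p (pvSimple x.1) PySem.Set.empty) (gs.map Prod.fst) := by
    rw [pvRootLoop_eq]
    exact pvFirstHit_eq_mFind c2p roots (gs.map Prod.fst) hroots hpw _
      (pvSP_walk c2p (pvSimple x.1) PySem.Set.empty)
  have hstep : pvStepB c2p (gs.map Prod.snd, roots) x =
      (match pvMFind (pvWalk c2p (pvSimple x.1) PySem.Set.empty) (gs.map Prod.fst) with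
       | some t => (pvAppendAt (gs.map Prod.snd) t x, roots)
       | none => ((gs.map Prod.snd) ++ [[x]],
           if (List.lookup (pvSimple x.1) roots).isSome then roots
           else roots ++ [(pvSimple x.1, (gs.map Prod.snd).length)])) := by
    rw [pvStepB]
    rw [hfh]
  rcases hm : pvMFind (pvWalk c2p (pvSimple x.1) PySem.Set.empty) (gs.map Prod.fst) with _ | k
  · rw [hstep, hm]
    have hms := pvMstep_of_none c2p x gs hm
    have hnames : (pvMstep c2p gs x).map Prod.fst = gs.map Prod.fst ++ [pvSimple x.1] := by
      rw [hms]; simp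
    have hnotin : ∀ a ∈ gs.map Prod.fst, a ∉ pvWalk c2p (pvSimple x.1) PySem.Set.empty :=
      (pvMFind_none_iff _ _).mp hm
    have hpw' : List.Pairwise (fun a b => a ∉ pvWalk c2p b PySem.Set.empty)
        ((pvMstep c2p gs x).map Prod.fst) := by
      rw [hnames, List.pairwise_append]
      exact ⟨hpw, List.pairwise_singleton _ _, fun a ha b hb =>
        (List.mem_singleton.mp hb) ▸ hnotin a ha⟩
    constructor
    · rw [hms]; simp
    · refine ⟨?_, hpw'⟩
      intro name
      rw [hnames, pvIdxOf_append]
      rcases hi : pvIdxOf name (gs.map Prod.fst) with _ | j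
      · have hnm : name ∉ gs.map Prod.fst := (pvIdxOf_none_iff _ _).mp hi
        by_cases hxs : (List.lookup (pvSimple x.1) roots).isSome
        · rw [if_pos hxs]
          have hne : pvSimple x.1 ≠ name := by
            intro hh
            rw [hh, hroots name, hi] at hxs
            cases hxs
          rw [hroots name, hi, if_neg hne]
        · rw [if_neg hxs]
          rw [List.lookup_append, hroots name, hi, Option.none_or]
          by_cases hxn : pvSimple x.1 = name
          · rw [if_pos hxn]
            have : (name == pvSimple x.1) = true := by simp [hxn]
            simp [List.lookup, this, List.length_map]
          · rw [if_neg hxn]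
            have : (name == pvSimple x.1) = false := by
              simp; exact fun hh => hxn hh.symm
            simp [List.lookup, this]
      · by_cases hxs : (List.lookup (pvSimple x.1) roots).isSome
        · rw [if_pos hxs, hroots name, hi]
        · rw [if_neg hxs, List.lookup_append, hroots name, hi]
          rfl
  · rw [hstep, hm]
    obtain ⟨hfst, hsnd⟩ := pvMstep_of_some c2p x gs k hm
    refine ⟨hsnd.symm, ⟨?_, ?_⟩⟩
    · intro name; rw [hfst]; exact hroots name
    · rw [hfst]; exact hpw

theorem pvFoldB_eq (c2p : List (String × String)) :
    ∀ (cl : List (String × Int)) (gs : List (String × List (String × Int)))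
      (roots : List (String × Nat)), pvInv c2p gs roots →
      (cl.foldl (pvStepB c2p) (gs.map Prod.snd, roots)).1 =
        (cl.foldl (pvMstep c2p) gs).map Prod.snd := by
  intro cl
  induction cl with
  | nil => intro gs roots _; rfl
  | cons x cl ih =>
    intro gs roots hinv
    obtain ⟨h1, h2⟩ := pvStepB_sim c2p gs roots x hinv
    rw [List.foldl_cons, List.foldl_cons,
      show pvStepB c2p (gs.map Prod.snd, roots) x =
        ((pvMstep c2p gs x).map Prod.snd, (pvStepB c2p (gs.map Prod.snd, roots) x).2) from
        Prod.ext h1 rfl]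
    exact ih (pvMstep c2p gs x) _ h2

theorem pvLookup_simpleNames (cl : List (String × Int)) :
    ∀ p, p ∈ cl.map Prod.fst →
      List.lookup p (cl.map (fun pg => (pg.1, pvSimple pg.1))) = some (pvSimple p) := by
  induction cl with
  | nil => intro p hp; simp at hp
  | cons hd tl ih =>
    intro p hp
    rw [List.map_cons, List.lookup]
    by_cases h : p = hd.1
    · rw [show (p == hd.1) = true by simp [h], h]
    · rw [show (p == hd.1) = false by simp [h]]
      apply ih p
      rw [List.map_cons] at hp
      rcases List.mem_cons.mp hp with hh | hh
      · exact absurd hh h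
      · exact hh

-- B's core pass equals pvM on every list (via the reference process)
theorem pvAltCore_eq_M (c2p : List (String × String)) (cl : List (String × Int)) :
    (cl.foldl (pvStepB c2p) ([], [])).1 = (pvM c2p cl).map Prod.snd := by
  have hinv : pvInv c2p [] [] := ⟨fun _ => rfl, List.Pairwise.nil⟩
  have h := pvFoldB_eq c2p cl [] [] hinv
  rw [pvFoldM_eq_M] at h
  exact h

-- A's passes equal pvM on lists of length ≥ 2
theorem pvA_eq_M (c2p : List (String × String)) (cl : List (String × Int)) :
    pvOuterA c2p (cl.map (fun pg => (pg.1, pvSimple pg.1))) (PySem.List.enumerate cl)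
      (PySem.List.enumerate cl) [] PySem.Set.empty = (pvM c2p cl).map Prod.snd := by
  have hnd : ((PySem.List.enumerate cl).map Prod.fst).Nodup := by
    have hp := PySem.List.pairwise_lt_enumerate cl 0
    exact List.pairwise_map.mpr (hp.imp (fun h => ne_of_lt h))
  have hsn : ∀ q ∈ PySem.List.enumerate cl,
      List.lookup q.2.1 (cl.map (fun pg => (pg.1, pvSimple pg.1))) = some (pvSimple q.2.1) := by
    intro q hq
    obtain ⟨k, hk, hqe⟩ := (PySem.List.mem_enumerate_iff cl 0 q).mp hq
    apply pvLookup_simpleNames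
    rw [hqe]
    exact List.mem_map.mpr ⟨cl[k], List.getElem_mem hk, rfl⟩
  have h := pvOuterA_spec c2p (cl.map (fun pg => (pg.1, pvSimple pg.1)))
    (PySem.List.enumerate cl) hnd hsn (PySem.List.enumerate cl) [] PySem.Set.empty
    (List.Sublist.refl _) rfl
  rw [h]
  have hfil : (PySem.List.enumerate cl).filter
      (fun q => !(PySem.Set.contains PySem.Set.empty q.1)) = PySem.List.enumerate cl := by
    apply List.filter_eq_self.mpr
    intro q _
    rfl
  rw [hfil]
  have hms : (PySem.List.enumerate cl).map Prod.snd = cl := by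
    simp [PySem.List.map_snd_enumerate cl 0]
  rw [hms]
  rfl

-- ===== VERDICT (by name: the statement is the Claim_ definition above) =====
theorem split_sibling_declarations_py_spec : Claim_equal_split_sibling_declarations_py := by
  intro cl c2p _
  unfold Spec_split_sibling_declarations_py
  match cl with
  | [] => rfl
  | [x] =>
    show split_sibling_declarations_py [x] c2p = split_sibling_declarations_py_alt [x] c2p
    have hB : split_sibling_declarations_py_alt [x] c2p = [[x]] := by
      rw [split_sibling_declarations_py_alt, if_neg (by simp), pvAltCore_eq_M, pvM_unfold]
      rw [show List.filter (fun q => !pvAncF c2p (pvSimple x.1) q) [] = [] from rfl, pvM_nil]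
      rfl
    rw [hB]
    rfl
  | x :: y :: rest =>
    show split_sibling_declarations_py (x :: y :: rest) c2p =
      split_sibling_declarations_py_alt (x :: y :: rest) c2p
    rw [split_sibling_declarations_py, if_neg (by simp),
      split_sibling_declarations_py_alt, if_neg (by simp)]
    rw [pvA_eq_M, pvAltCore_eq_M]
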